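-- pv_equiv track=rewrite | github.com/rligithub/Leetcode | Backtracking/816. Ambiguous Coordinates.py | getallpossible
-- ===== SOURCE A (Python) =====
-- def getallpossible(s: str):
--
--     # CASE1: 如果第一个字符为0 那么 要么这个数字是 0 要么这个数字是 0.xxx
--     if s != '0' and s[0] == '0':  # if first digit is 0 and there is digits after 0
--         if s[-1] != '0':  # if last digit is not 0 --> add '.'
--             return ["0." + s[1:]]
--         else:  # if last digit is 0 --> not add '.'
--             return []
--
--     # CASE2: 如果结尾是0 那么这个数不能是是小数
--     if s[-1] == '0':  # if last digit is 0 --> not add '.'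
--         return [s]
--
--     res = [s]
--     for i in range(1, len(s)):
--         res.append(s[:i] + "." + s[i:])
--     return res
-- ===== SOURCE B (Python) =====
-- def getallpossible(s: str):
--     # uniform enumeration: undotted s, then every dot position, filtered by validity
--     def ok_int(t):
--         return t == '0' or t[0] != '0'
--     res = []
--     if ok_int(s):
--         res.append(s)
--     for i in range(1, len(s)):
--         left, right = s[:i], s[i:]
--         if ok_int(left) and right[-1] != '0':
--             res.append(left + '.' + right)
--     return res
-- ===== Notes on version B (the rewrite author's own statement) =====
-- stated objective: simpler
-- what changed: A's early-return case analysis on the first/last character is replaced by a uniform enumeration: the undotted string and every dot position are emitted through one validity predicate (valid integer part, fractional part not ending in '0').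
import Mathlib
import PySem

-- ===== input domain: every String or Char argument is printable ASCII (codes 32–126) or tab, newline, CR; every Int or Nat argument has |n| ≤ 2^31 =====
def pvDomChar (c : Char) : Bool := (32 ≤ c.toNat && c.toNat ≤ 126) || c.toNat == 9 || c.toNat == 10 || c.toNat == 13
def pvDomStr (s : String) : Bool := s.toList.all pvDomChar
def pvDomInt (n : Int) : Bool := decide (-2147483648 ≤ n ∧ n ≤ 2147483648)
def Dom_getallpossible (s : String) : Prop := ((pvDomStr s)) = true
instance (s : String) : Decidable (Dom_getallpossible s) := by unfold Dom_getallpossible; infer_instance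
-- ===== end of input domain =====

-- B replaces A's early-return case analysis by a uniform enumeration of all dot
-- positions filtered through one validity predicate (objective: simpler).

-- ===== PORT A =====
def getallpossible (s : String) : List String :=
  let cs := s.toList
  if s ≠ "0" ∧ PySem.List.pyGetD cs 0 'x' = '0' then
    if PySem.List.pyGetD cs (-1) 'x' ≠ '0' then
      [String.ofList ('0' :: '.' :: PySem.List.slice cs (some 1) none)]
    else []
  else if PySem.List.pyGetD cs (-1) 'x' = '0' then [s]
  else
    (PySem.List.pyRange 1 (cs.length : Int) 1).foldl
      (fun res i =>
        res ++ [String.ofList (PySem.List.slice cs none (some i) ++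
                           '.' :: PySem.List.slice cs (some i) none)]) [s]

-- ===== PORT B =====
-- ok_int t: t is a valid integer part, i.e. t == '0' or t[0] != '0'
def okInt (t : List Char) : Bool :=
  t == ['0'] || PySem.List.pyGetD t 0 'x' != '0'

def getallpossible_alt (s : String) : List String :=
  let cs := s.toList
  let res : List String := if okInt cs then [s] else []
  (PySem.List.pyRange 1 (cs.length : Int) 1).foldl
    (fun res i =>
      let left := PySem.List.slice cs none (some i)
      let right := PySem.List.slice cs (some i) none
      if okInt left && (PySem.List.pyGetD right (-1) 'x' != '0') then
        res ++ [String.ofList (left ++ '.' :: right)]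
      else res) res

-- ===== PRECONDITION & SPEC =====
-- Pre_ excludes only the empty string, on which A's s[0] raises IndexError (B raises there too).
def Pre_getallpossible (s : String) : Prop := s ≠ ""
instance (s : String) : Decidable (Pre_getallpossible s) := by unfold Pre_getallpossible; infer_instance
def pvWitness_getallpossible : String := "012"

def Spec_getallpossible (s : String) (out : List String) : Prop := out = getallpossible_alt s
instance (s : String) (out : List String) : Decidable (Spec_getallpossible s out) := by unfold Spec_getallpossible; infer_instance

-- ===== CLAIM (what is proved, stated in full; the proofs are below) =====
def Claim_equal_getallpossible : Prop := ∀ (s : String), Dom_getallpossible s → Pre_getallpossible s → Spec_getallpossible s (getallpossible s)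

-- ===== LEMMAS AND PROOFS =====
theorem okInt_zero_cons (t : List Char) (h : t ≠ []) : okInt ('0' :: t) = false := by
  simp [okInt, PySem.List.pyGetD_zero_cons, h]

theorem okInt_head_ne (c : Char) (t : List Char) (h : c ≠ '0') : okInt (c :: t) = true := by
  simp [okInt, PySem.List.pyGetD_zero_cons, h]

-- the loop predicate of B
theorem main (s : String) (h : s.toList ≠ []) : getallpossible s = getallpossible_alt s := by
  by_cases hs0 : s = "0"
  · subst hs0; decide
  obtain ⟨c, rest, hc⟩ := List.exists_cons_of_ne_nil h
  have hne : c :: rest ≠ [] := List.cons_ne_nil c rest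
  -- both folds in filtered-map form
  have hB : getallpossible_alt s =
      (if okInt (c :: rest) then [s] else []) ++
      ((PySem.List.pyRange 1 ((c :: rest).length : Int) 1).filter
        (fun i => okInt (PySem.List.slice (c :: rest) none (some i)) &&
           (PySem.List.pyGetD (PySem.List.slice (c :: rest) (some i) none) (-1) 'x' != '0'))).map
        (fun i => String.ofList (PySem.List.slice (c :: rest) none (some i) ++
                    '.' :: PySem.List.slice (c :: rest) (some i) none)) := by
    simp only [getallpossible_alt, hc]
    rw [PySem.List.foldl_append_if]
  by_cases hc0 : c = '0'
  · subst hc0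
    have hrest : rest ≠ [] := by
      rintro rfl
      exact hs0 (by apply String.toList_inj.mp; rw [hc]; rfl)
    have hA : getallpossible s =
        if rest.getLast hrest ≠ '0' then [String.ofList ('0' :: '.' :: rest)] else [] := by
      simp only [getallpossible, hc]
      rw [if_pos ⟨hs0, by simp [PySem.List.pyGetD_zero_cons]⟩,
        PySem.List.pyGetD_neg_one _ 'x' hne, List.getLast_cons hrest,
        PySem.List.slice_from_one]
      rfl
    rw [hA, hB, okInt_zero_cons rest hrest]
    have hcons : PySem.List.pyRange 1 (('0' :: rest).length : Int) 1 =
        1 :: PySem.List.pyRange 2 (('0' :: rest).length : Int) 1 := by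
      rw [PySem.List.pyRange_one_cons (by
        have h1 : 1 ≤ rest.length := List.length_pos_of_ne_nil hrest
        simp only [List.length_cons]
        push_cast
        omega)]
      norm_num
    rw [hcons]
    rw [List.filter_cons]
    have h2 : (PySem.List.pyRange 2 (('0' :: rest).length : Int) 1).filter
        (fun i => okInt (PySem.List.slice ('0' :: rest) none (some i)) &&
           (PySem.List.pyGetD (PySem.List.slice ('0' :: rest) (some i) none) (-1) 'x' != '0')) = [] := by
      apply List.filter_eq_nil_iff.mpr
      intro i hi
      obtain ⟨h2i, hilt⟩ := (PySem.List.mem_pyRange_one).mp hi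
      rw [PySem.List.slice_to _ (by omega)]
      have : i.toNat = (i.toNat - 1) + 1 := by omega
      rw [this, List.take_succ_cons, okInt_zero_cons]
      · simp
      · intro hcon
        rcases List.take_eq_nil_iff.mp hcon with h' | h'
        · omega
        · exact hrest h'
    rw [h2]
    have hp1 : (okInt (PySem.List.slice ('0' :: rest) none (some 1)) &&
        (PySem.List.pyGetD (PySem.List.slice ('0' :: rest) (some 1) none) (-1) 'x' != '0')) =
        (rest.getLast hrest != '0') := by
      rw [PySem.List.slice_from_one, PySem.List.slice_to _ (by norm_num)]
      simp only [List.tail_cons]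
      rw [PySem.List.pyGetD_neg_one _ 'x' hrest]
      norm_num [okInt]
    rw [hp1]
    by_cases hL : rest.getLast hrest = '0'
    · simp [hL]
    · rw [if_pos hL, if_neg (show ¬ (false = true) by simp),
          if_pos (show (rest.getLast hrest != '0') = true by simpa using hL)]
      simp only [List.map_cons, List.map_nil, List.nil_append, PySem.List.slice_from_one,
        PySem.List.slice_to _ (by norm_num : (0:Int) ≤ 1), List.tail_cons]
      rfl
  · -- c ≠ '0'
    have hokcs : okInt (c :: rest) = true := okInt_head_ne c rest hc0
    have hA0 : getallpossible s =
        (if PySem.List.pyGetD (c :: rest) (-1) 'x' = '0' then [s]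
         else (PySem.List.pyRange 1 ((c :: rest).length : Int) 1).foldl
           (fun res i =>
             res ++ [String.ofList (PySem.List.slice (c :: rest) none (some i) ++
               '.' :: PySem.List.slice (c :: rest) (some i) none)]) [s]) := by
      simp only [getallpossible, hc]
      rw [if_neg (by simp [PySem.List.pyGetD_zero_cons, hc0])]
    rw [PySem.List.pyGetD_neg_one _ 'x' hne] at hA0
    have hpt : ∀ i : Int, 1 ≤ i → i < ((c :: rest).length : Int) →
        PySem.List.pyGetD (PySem.List.slice (c :: rest) (some i) none) (-1) 'x' =
          (c :: rest).getLast hne := by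
      intro i h1 h2
      rw [PySem.List.slice_from _ (by omega)]
      have hd : (c :: rest).drop i.toNat ≠ [] := by
        intro hcon
        have hle := List.drop_eq_nil_iff.mp hcon
        simp only [List.length_cons] at hle h2
        omega
      rw [PySem.List.pyGetD_neg_one _ 'x' hd, List.getLast_drop hd]
    have hpo : ∀ i : Int, 1 ≤ i → okInt (PySem.List.slice (c :: rest) none (some i)) = true := by
      intro i h1
      rw [PySem.List.slice_to _ (by omega)]
      have hsp : i.toNat = (i.toNat - 1) + 1 := by omega
      rw [hsp, List.take_succ_cons]
      exact okInt_head_ne _ _ hc0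
    by_cases hL : (c :: rest).getLast hne = '0'
    · rw [hA0, if_pos hL, hB, hokcs]
      have hf : (PySem.List.pyRange 1 ((c :: rest).length : Int) 1).filter
          (fun i => okInt (PySem.List.slice (c :: rest) none (some i)) &&
             (PySem.List.pyGetD (PySem.List.slice (c :: rest) (some i) none) (-1) 'x' != '0')) = [] := by
        apply List.filter_eq_nil_iff.mpr
        intro i hi
        obtain ⟨h1, h2⟩ := (PySem.List.mem_pyRange_one).mp hi
        simp [hpt i h1 h2, hL]
      rw [hf]
      simp
    · rw [hA0, if_neg hL, hB, hokcs]
      rw [PySem.List.foldl_append_singleton_eq_map]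
      have hf : (PySem.List.pyRange 1 ((c :: rest).length : Int) 1).filter
          (fun i => okInt (PySem.List.slice (c :: rest) none (some i)) &&
             (PySem.List.pyGetD (PySem.List.slice (c :: rest) (some i) none) (-1) 'x' != '0')) =
          PySem.List.pyRange 1 ((c :: rest).length : Int) 1 := by
        apply List.filter_eq_self.mpr
        intro i hi
        obtain ⟨h1, h2⟩ := (PySem.List.mem_pyRange_one).mp hi
        simp [hpo i h1, hpt i h1 h2, hL]
      rw [hf]
      simp

-- ===== VERDICT (by name: the statement is the Claim_ definition above) =====
theorem getallpossible_spec : Claim_equal_getallpossible := by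
  intro s _ hpre
  have h : s.toList ≠ [] := by
    intro hnil
    exact hpre (String.toList_inj.mp (by rw [hnil]; rfl))
  exact main s h
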